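-- pv_equiv track=rewrite | github.com/reallocf/nlp_gps | Utils.py | exactlyOneOf
-- ===== SOURCE A (Python) =====
-- def exactlyOneOf(lst):
--     res = False
--     for elem in lst:
--         if res == True and elem == True:
--             return False
--         if elem == True:
--             res = elem
--     return res
-- ===== SOURCE B (Python) =====
-- def exactlyOneOf(lst):
--     matches = [e for e in lst if e == True]
--     return matches[0] if len(matches) == 1 else False
-- ===== Notes on version B (the rewrite author's own statement) =====
-- stated objective: simpler
-- what changed: Replaces the flag-threading loop with an early return by a two-phase decomposition: collect the True elements into a list, then decide by its length.
import Mathlib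
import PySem

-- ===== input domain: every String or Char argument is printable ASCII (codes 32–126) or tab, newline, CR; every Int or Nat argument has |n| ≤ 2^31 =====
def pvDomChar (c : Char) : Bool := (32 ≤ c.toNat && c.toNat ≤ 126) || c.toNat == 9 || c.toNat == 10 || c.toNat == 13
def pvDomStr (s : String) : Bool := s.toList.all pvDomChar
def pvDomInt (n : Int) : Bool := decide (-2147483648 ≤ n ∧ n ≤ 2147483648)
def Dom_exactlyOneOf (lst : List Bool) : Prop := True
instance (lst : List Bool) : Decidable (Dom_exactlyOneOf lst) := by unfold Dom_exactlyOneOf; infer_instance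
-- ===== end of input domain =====

-- B replaces A's flag-threading loop (early return on a second True) by a two-phase
-- decomposition: filter the True elements, then branch on the length (objective: simpler).

-- ===== PORT A =====
-- the loop over lst with accumulator res and an early `return False`
def exactlyOneOfGo (res : Bool) (lst : List Bool) : Bool :=
  match lst with
  | [] => res
  | elem :: rest =>
    if res == true && elem == true then false
    else exactlyOneOfGo (if elem == true then elem else res) rest

def exactlyOneOf (lst : List Bool) : Bool := exactlyOneOfGo false lst

-- ===== PORT B =====
def exactlyOneOf_alt (lst : List Bool) : Bool :=
  let ms := lst.filter (fun e => e == true)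
  if ms.length == 1 then ms.headD false else false

-- ===== PRECONDITION & SPEC =====
def Spec_exactlyOneOf (lst : List Bool) (out : Bool) : Prop := out = exactlyOneOf_alt lst
instance (lst : List Bool) (out : Bool) : Decidable (Spec_exactlyOneOf lst out) := by unfold Spec_exactlyOneOf; infer_instance

-- ===== CLAIM (what is proved, stated in full; the proofs are below) =====
def Claim_equal_exactlyOneOf : Prop := ∀ (lst : List Bool), Dom_exactlyOneOf lst → Spec_exactlyOneOf lst (exactlyOneOf lst)

-- ===== LEMMAS AND PROOFS =====

-- characterisation of A's loop by the count of `true` in the remaining list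
theorem exactlyOneOfGo_char (lst : List Bool) : ∀ res : Bool,
    exactlyOneOfGo res lst =
      (if res then decide (lst.count true = 0) else decide (lst.count true = 1)) := by
  induction lst with
  | nil => intro res; cases res <;> simp [exactlyOneOfGo]
  | cons e t ih =>
    intro res
    cases res <;> cases e <;>
      simp [exactlyOneOfGo, ih]

-- B also computes `count true = 1` (and on a single match returns that true element)
theorem exactlyOneOf_alt_char (lst : List Bool) :
    exactlyOneOf_alt lst = decide (lst.count true = 1) := by
  unfold exactlyOneOf_alt
  have hcount : (lst.filter (fun e => e == true)).length = lst.count true := by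
    simp [List.count_eq_length_filter]
  by_cases h : (lst.filter (fun e => e == true)).length = 1
  · rcases hm : lst.filter (fun e => e == true) with _ | ⟨x, rest⟩
    · rw [hm] at h; simp at h
    · have hx : x = true := by
        have := List.mem_filter.mp (hm ▸ List.mem_cons_self (l := rest))
        simpa using this.2
      rw [hm] at h hcount
      simp [hx, ← hcount]
  · have hc : lst.count true ≠ 1 := hcount ▸ h
    simp only [beq_iff_eq]
    rw [if_neg h]
    simp [hc]

-- ===== VERDICT (by name: the statement is the Claim_ definition above) =====
theorem exactlyOneOf_spec : Claim_equal_exactlyOneOf := by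
  intro lst _
  unfold Spec_exactlyOneOf exactlyOneOf
  rw [exactlyOneOfGo_char, exactlyOneOf_alt_char]
  simp
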